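-- pv_equiv track=rewrite | github.com/jc98924/Metis-Data-Science-Prework | lessons/python_intro/calc_row_value.py | calc_row_value
-- ===== SOURCE A (Python) =====
-- def calc_row_value(input_string):
--     """
--     This function takes a string input, converts it to an integer value and
--     then outputs a "new value".
--     ---
--     args:
--         input_string(str): input string
--     returns:
--         calc_value (int): output value
--     """
--
--     if type(input_string) != str:
--         raise ValueError("input_string must be a string type!")
--
--     str_conv = [int(d) for d in input_string if d.isdecimal()]
--     calc_value = 0
--     for index, digit in enumerate(str_conv):
--         num_index = index + 1
--         if num_index % 2 != 0:
--             calc_value += digit * num_index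
--         else:
--             calc_value -= digit * 5
--     return calc_value
-- ===== SOURCE B (Python) =====
-- def calc_row_value(input_string):
--     if type(input_string) != str:
--         raise ValueError("input_string must be a string type!")
--
--     digits = [int(d) for d in input_string if d.isdecimal()]
--
--     # consume the digits two at a time, carrying the odd 1-based position k:
--     # weight k for the first of each pair, flat -5 for the second; no parity test needed
--     total = 0
--     k = 1
--     i = 0
--     n = len(digits)
--     while i + 1 < n:
--         total += digits[i] * k - 5 * digits[i + 1]
--         i += 2
--         k += 2
--     if i < n:
--         total += digits[i] * k
--     return total
-- ===== Notes on version B (the rewrite author's own statement) =====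
-- stated objective: alternative
-- what changed: Replaces the indexed single loop with a per-element parity branch by a two-at-a-time accumulator loop that carries the odd 1-based position and needs no parity test.
import Mathlib
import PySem

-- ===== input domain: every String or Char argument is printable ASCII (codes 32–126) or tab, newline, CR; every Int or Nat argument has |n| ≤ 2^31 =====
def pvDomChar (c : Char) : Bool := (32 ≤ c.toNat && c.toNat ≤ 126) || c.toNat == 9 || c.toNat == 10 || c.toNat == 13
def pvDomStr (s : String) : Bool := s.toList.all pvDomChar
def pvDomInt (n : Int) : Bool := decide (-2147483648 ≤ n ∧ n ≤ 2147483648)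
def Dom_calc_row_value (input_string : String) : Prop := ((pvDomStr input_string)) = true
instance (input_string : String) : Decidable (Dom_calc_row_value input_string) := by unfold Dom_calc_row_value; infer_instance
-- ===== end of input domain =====

-- B replaces A's indexed loop with a parity branch by a two-at-a-time recursion
-- carrying the odd 1-based position (objective: alternative decomposition; return value only).

-- ===== PORT A =====
-- str.isdecimal per char: on the ASCII domain identical to PySem.Chars.isdigit (exact there);
-- int(d) for a single decimal ASCII digit d is its code point minus 48 (exact).
def calc_row_value (input_string : String) : Int :=
  let str_conv : List Int :=
    (input_string.toList.filter (fun c => PySem.Chars.isdigit c)).map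
      (fun c => (c.toNat : Int) - 48)
  (PySem.List.enumerate str_conv 0).foldl
    (fun calc_value p =>
      let num_index := p.1 + 1
      if PySem.Int.mod num_index 2 ≠ 0 then calc_value + p.2 * num_index
      else calc_value - p.2 * 5)
    0

-- ===== PORT B =====
-- Source B's while loop over indices i, i+1 of `digits`, rendered as the same loop on the
-- remaining suffix of the list: two elements per step, carrying k and the accumulator total
def pvGo : List Int → Int → Int → Int
  | [], _, total => total
  | [d], k, total => total + d * k
  | d1 :: d2 :: rest, k, total => pvGo rest (k + 2) (total + (d1 * k - 5 * d2))

def calc_row_value_alt (input_string : String) : Int :=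
  let digits : List Int :=
    (input_string.toList.filter (fun c => PySem.Chars.isdigit c)).map
      (fun c => (c.toNat : Int) - 48)
  pvGo digits 1 0

-- ===== PRECONDITION & SPEC =====
def Spec_calc_row_value (input_string : String) (out : Int) : Prop := out = calc_row_value_alt input_string
instance (input_string : String) (out : Int) : Decidable (Spec_calc_row_value input_string out) := by unfold Spec_calc_row_value; infer_instance

-- ===== CLAIM (what is proved, stated in full; the proofs are below) =====
def Claim_equal_calc_row_value : Prop := ∀ (input_string : String), Dom_calc_row_value input_string → Spec_calc_row_value input_string (calc_row_value input_string)

-- ===== LEMMAS AND PROOFS =====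

theorem pv_mod_odd (s : Int) : PySem.Int.mod (2 * s + 1) 2 = 1 := by
  rw [PySem.Int.mod_eq_emod_of_pos (by omega)]; omega

theorem pv_mod_even (s : Int) : PySem.Int.mod (2 * s + 2) 2 = 0 := by
  rw [PySem.Int.mod_eq_emod_of_pos (by omega)]; omega

theorem pv_loop_eq_go (n : Nat) : ∀ (ds : List Int), ds.length ≤ n → ∀ (s : Nat) (acc : Int),
    (PySem.List.enumerate ds (2 * (s : Int))).foldl
      (fun calc_value p =>
        let num_index := p.1 + 1
        if PySem.Int.mod num_index 2 ≠ 0 then calc_value + p.2 * num_index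
        else calc_value - p.2 * 5)
      acc = pvGo ds (2 * (s : Int) + 1) acc := by
  induction n with
  | zero =>
    intro ds h s acc
    have : ds = [] := List.eq_nil_of_length_eq_zero (by omega)
    simp [this, pvGo]
  | succ n ih =>
    intro ds h s acc
    match ds with
    | [] => simp [pvGo]
    | [d] =>
      simp only [PySem.List.enumerate_cons, PySem.List.enumerate_nil, List.foldl_cons,
        List.foldl_nil, pvGo, pv_mod_odd]
      rw [if_pos (by norm_num)]
    | d1 :: d2 :: rest =>
      have m2 : PySem.Int.mod (2 * (s : Int) + 1 + 1) 2 = 0 := by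
        rw [show (2 * (s : Int) + 1 + 1) = 2 * (s : Int) + 2 from by ring]
        exact pv_mod_even _
      have h2 : (2 * (s : Int) + 1 + 1) = 2 * ((s + 1 : Nat) : Int) := by push_cast; ring
      simp only [PySem.List.enumerate_cons, List.foldl_cons, pvGo, pv_mod_odd, m2]
      rw [if_neg (by simp), if_pos (by norm_num)]
      rw [h2, ih rest (by simp at h; omega) (s + 1)]
      congr 1; ring

-- ===== VERDICT (by name: the statement is the Claim_ definition above) =====
theorem calc_row_value_spec : Claim_equal_calc_row_value := by
  intro input_string _
  unfold Spec_calc_row_value calc_row_value calc_row_value_alt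
  have := pv_loop_eq_go
    ((input_string.toList.filter (fun c => PySem.Chars.isdigit c)).map
      (fun c => (c.toNat : Int) - 48)).length
    ((input_string.toList.filter (fun c => PySem.Chars.isdigit c)).map
      (fun c => (c.toNat : Int) - 48)) le_rfl 0 0
  simpa using this
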